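-- pv_equiv track=rewrite | github.com/Azzing1017/Algorithm | 프로그래머스/0/120835. 진료 순서 정하기/진료 순서 정하기.py | solution
-- ===== SOURCE A (Python) =====
-- def solution(emergency):
--     answer = []
--     li = []
--     for i, v in enumerate(emergency):
--         li.append([i, v])
--     li.sort(key=lambda x: x[1])
--     l = len(emergency)
--     answer = [0] * l
--     for i, v in enumerate(li):
--         answer[v[0]] = l - i
--     return answer
-- ===== SOURCE B (Python) =====
-- def solution(emergency):
--     n = len(emergency)
--     return [1 + sum(1 for w in emergency if w > v)
--               + sum(1 for j, w in enumerate(emergency) if j > i and w == v)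
--             for i, v in enumerate(emergency)]
-- ===== Notes on version B (the rewrite author's own statement) =====
-- stated objective: alternative
-- what changed: Replaced the sort-and-assign pass (enumerate, stable sort by value, write l-i into answer[original index]) by a direct per-index rank count with no sort and no in-place writes: answer[i] = 1 + #(values greater) + #(equal values at later indices).
import Mathlib
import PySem

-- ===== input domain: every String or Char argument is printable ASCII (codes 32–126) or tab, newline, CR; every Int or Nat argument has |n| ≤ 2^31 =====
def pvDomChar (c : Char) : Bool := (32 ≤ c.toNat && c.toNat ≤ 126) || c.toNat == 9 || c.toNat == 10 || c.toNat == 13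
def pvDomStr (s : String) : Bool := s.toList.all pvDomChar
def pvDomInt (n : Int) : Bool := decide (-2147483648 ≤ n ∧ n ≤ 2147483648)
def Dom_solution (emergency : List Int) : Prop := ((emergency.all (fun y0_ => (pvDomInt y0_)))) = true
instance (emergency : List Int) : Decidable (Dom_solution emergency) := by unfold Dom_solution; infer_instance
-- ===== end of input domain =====

-- B replaces A's sort-and-assign pass by a direct per-index rank count (no sort, no in-place writes; quadratic counting, so slower than A on large inputs).


-- ===== PORT A =====
-- hand port of Python's list item assignment 'xs[i] = v'; exact for 0 ≤ i < len(xs),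
-- the only indices A ever uses (they come from enumerate(emergency))
def pySetItem (xs : List Int) (i : Int) (v : Int) : List Int := xs.set i.toNat v

def solution (emergency : List Int) : List Int :=
  let li := PySem.List.enumerate emergency 0
  let li := PySem.List.sorted li (fun p => p.2) false
  let l : Int := emergency.length
  let answer := List.replicate emergency.length (0 : Int)
  (PySem.List.enumerate li 0).foldl (fun ans iv => pySetItem ans iv.2.1 (l - iv.1)) answer

-- ===== PORT B =====
def solution_alt (emergency : List Int) : List Int :=
  (PySem.List.enumerate emergency 0).map (fun iv =>
    1 + (emergency.countP (fun w => decide (iv.2 < w)) : Int)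
      + ((PySem.List.enumerate emergency 0).countP
           (fun jw => decide (iv.1 < jw.1) && decide (jw.2 = iv.2)) : Int))

-- ===== PRECONDITION & SPEC =====
def Spec_solution (emergency : List Int) (out : List Int) : Prop := out = solution_alt emergency
instance (emergency : List Int) (out : List Int) : Decidable (Spec_solution emergency out) := by unfold Spec_solution; infer_instance

-- ===== CLAIM (what is proved, stated in full; the proofs are below) =====
def Claim_equal_solution : Prop := ∀ (emergency : List Int), Dom_solution emergency → Spec_solution emergency (solution emergency)

-- ===== LEMMAS AND PROOFS =====
def lexP (a b : Int × Int) : Prop := a.2 < b.2 ∨ (a.2 = b.2 ∧ a.1 < b.1)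

theorem insertBy_eq_cons_or_tail (b : (Int × Int) → (Int × Int) → Bool) (x y : Int × Int) (t : List (Int × Int)) :
    PySem.List.insertBy b x (y :: t) = if b x y then x :: y :: t else y :: PySem.List.insertBy b x t := by
  by_cases h : b x y <;> simp [PySem.List.insertBy, h]

theorem insertBy_lex (x : Int × Int) (acc : List (Int × Int))
    (h1 : acc.Pairwise lexP) (h2 : ∀ y ∈ acc, y.1 < x.1) :
    (PySem.List.insertBy (fun a b => decide (a.2 < b.2)) x acc).Pairwise lexP := by
  induction acc with
  | nil => simp [PySem.List.insertBy]
  | cons y t ih =>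
    rw [insertBy_eq_cons_or_tail]
    rcases List.pairwise_cons.mp h1 with ⟨hyt, ht⟩
    by_cases h : x.2 < y.2
    · simp only [h, decide_true, if_true]
      refine List.pairwise_cons.mpr ⟨?_, h1⟩
      intro z hz
      rcases List.mem_cons.mp hz with rfl | hz
      · exact Or.inl h
      · rcases hyt z hz with hlt | ⟨heq, _⟩
        · exact Or.inl (lt_trans h hlt)
        · exact Or.inl (heq ▸ h)
    · simp only [h, decide_false]
      refine List.pairwise_cons.mpr ⟨?_, ih ht (fun z hz => h2 z (List.mem_cons_of_mem _ hz))⟩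
      intro z hz
      rcases (PySem.List.mem_insertBy _ x z t).mp hz with rfl | hz
      · rcases lt_or_eq_of_le (not_lt.mp h) with hlt | heq
        · exact Or.inl hlt
        · exact Or.inr ⟨heq, h2 y (List.mem_cons_self)⟩
      · exact hyt z hz

theorem foldl_insertBy_lex (li : List (Int × Int)) : ∀ (acc : List (Int × Int)),
    acc.Pairwise lexP → (∀ y ∈ acc, ∀ x ∈ li, y.1 < x.1) →
    li.Pairwise (fun a b => a.1 < b.1) →
    (li.foldl (fun acc x => PySem.List.insertBy (fun a b => decide (a.2 < b.2)) x acc) acc).Pairwise lexP := by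
  induction li with
  | nil => intro acc h1 _ _; simpa using h1
  | cons x t ih =>
    intro acc h1 h2 h3
    rcases List.pairwise_cons.mp h3 with ⟨hxt, ht⟩
    simp only [List.foldl_cons]
    apply ih
    · exact insertBy_lex x acc h1 (fun y hy => h2 y hy x (List.mem_cons_self))
    · intro y hy z hz
      rcases (PySem.List.mem_insertBy _ x y acc).mp hy with rfl | hy
      · exact hxt z hz
      · exact h2 y hy z (List.mem_cons_of_mem _ hz)
    · exact ht

def lexb (a b : Int × Int) : Bool := decide (a.2 < b.2) || (decide (a.2 = b.2) && decide (a.1 < b.1))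

theorem lexb_iff (a b : Int × Int) : lexb a b = true ↔ lexP a b := by simp [lexb, lexP]

theorem lexP_asymm {a b : Int × Int} (h1 : lexP a b) (h2 : lexP b a) : False := by
  rcases h1 with h1 | ⟨h1, h1'⟩ <;> rcases h2 with h2 | ⟨h2, h2'⟩ <;> omega

theorem pos_eq_countP (S : List (Int × Int)) (hp : S.Pairwise lexP) :
    ∀ (j : Nat) (hj : j < S.length), S.countP (fun y => lexb y S[j]) = j := by
  induction S with
  | nil => intro j hj; simp at hj
  | cons a t ih =>
    rcases List.pairwise_cons.mp hp with ⟨hat, ht⟩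
    intro j hj
    cases j with
    | zero =>
      simp only [List.getElem_cons_zero, List.countP_cons]
      have ha : lexb a a = false := by
        rw [Bool.eq_false_iff]; intro h
        exact lexP_asymm ((lexb_iff _ _).mp h) ((lexb_iff _ _).mp h)
      have hct : t.countP (fun y => lexb y a) = 0 := by
        rw [List.countP_eq_zero]
        intro y hy h
        exact lexP_asymm ((lexb_iff _ _).mp h) (hat y hy)
      simp [hct, ha]
    | succ j =>
      simp only [List.getElem_cons_succ, List.countP_cons]
      have hj' : j < t.length := by simpa using hj
      have haj : lexb a t[j] = true := (lexb_iff _ _).mpr (hat t[j] (List.getElem_mem hj'))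
      rw [ih ht j hj', haj]; simp

theorem foldl_set_length (n : Int) : ∀ (S : List (Int × Int)) (s : Int) (ans : List Int),
    ((PySem.List.enumerate S s).foldl (fun a iv => pySetItem a iv.2.1 (n - iv.1)) ans).length = ans.length := by
  intro S
  induction S with
  | nil => intro s ans; simp [PySem.List.enumerate]
  | cons p t ih =>
    intro s ans
    rw [PySem.List.enumerate_cons]
    simp only [List.foldl_cons]
    rw [ih]
    simp [pySetItem]

theorem foldl_set_getD (n : Int) : ∀ (S : List (Int × Int)) (s : Int) (ans : List Int),
    (∀ p ∈ S, 0 ≤ p.1 ∧ p.1 < (ans.length : Int)) →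
    (S.map (fun p => p.1)).Nodup →
    ∀ (k : Nat), k < ans.length →
    ((PySem.List.enumerate S s).foldl (fun a iv => pySetItem a iv.2.1 (n - iv.1)) ans).getD k 0 =
      (match PySem.List.index? (S.map (fun p => p.1)) (k : Int) with
       | some j => n - (s + j)
       | none => ans.getD k 0) := by
  intro S
  induction S with
  | nil => intro s ans _ _ k hk; simp [PySem.List.enumerate, PySem.List.index?]
  | cons p t ih =>
    intro s ans hrange hnodup k hk
    rw [PySem.List.enumerate_cons]
    simp only [List.foldl_cons]
    have hp := hrange p (List.mem_cons_self)
    have hlen : (pySetItem ans p.1 (n - s)).length = ans.length := by simp [pySetItem]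
    have hrange' : ∀ q ∈ t, 0 ≤ q.1 ∧ q.1 < ((pySetItem ans p.1 (n - s)).length : Int) := by
      intro q hq; rw [hlen]; exact hrange q (List.mem_cons_of_mem _ hq)
    have hnodup' : (t.map (fun p => p.1)).Nodup := (List.nodup_cons.mp (by simpa using hnodup)).2
    have hpt : p.1 ∉ t.map (fun p => p.1) := (List.nodup_cons.mp (by simpa using hnodup)).1
    rw [ih (s+1) _ hrange' hnodup' k (by rw [hlen]; exact hk)]
    by_cases hcase : p.1 = (k : Int)
    · -- head hits k; k not in tail
      have hnotail : PySem.List.index? (t.map (fun p => p.1)) (k : Int) = none := by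
        rw [PySem.List.index?_eq_none_iff]; rw [← hcase]; exact hpt
      have hhead : PySem.List.index? ((p :: t).map (fun p => p.1)) (k : Int) = some 0 := by
        simp only [List.map_cons, hcase]; exact PySem.List.index?_cons_self _ _
      rw [hnotail, hhead]
      have : (pySetItem ans p.1 (n - s)).getD k 0 = n - s := by
        simp only [pySetItem, hcase]
        rw [List.getD_eq_getElem?_getD]
        simp [hk]
      rw [this]; simp
    · have hhead : PySem.List.index? ((p :: t).map (fun q => q.1)) (k : Int) =
          Option.map (fun x => x + 1) (PySem.List.index? (t.map (fun q => q.1)) (k : Int)) := by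
        simp only [List.map_cons]
        exact PySem.List.index?_cons_of_ne _ hcase
      rw [hhead]
      have hskip : (pySetItem ans p.1 (n - s)).getD k 0 = ans.getD k 0 := by
        simp only [pySetItem]
        rw [List.getD_eq_getElem?_getD, List.getD_eq_getElem?_getD, List.getElem?_set_ne]
        omega
      cases hidx : PySem.List.index? (t.map (fun q => q.1)) (k : Int) with
      | none =>
        simp only [List.getD_eq_getElem?_getD] at hskip
        simpa using hskip
      | some j => simp only [Option.map_some]; push_cast; ring_nf

theorem countP_or_disjoint (l : List (Int × Int)) (p q : (Int × Int) → Bool)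
    (h : ∀ x ∈ l, ¬(p x = true ∧ q x = true)) :
    l.countP (fun x => p x || q x) = l.countP p + l.countP q := by
  induction l with
  | nil => simp
  | cons a t ih =>
    simp only [List.countP_cons]
    rw [ih (fun x hx => h x (List.mem_cons_of_mem _ hx))]
    have := h a (List.mem_cons_self)
    by_cases hp : p a <;> by_cases hq : q a <;> simp [hp, hq] at this ⊢ <;> omega

theorem main_check (em : List Int) :
    (let li := PySem.List.enumerate em 0
     let li := PySem.List.sorted li (fun p => p.2) false
     let l : Int := em.length
     let answer := List.replicate em.length (0 : Int)
     (PySem.List.enumerate li 0).foldl (fun ans iv => pySetItem ans iv.2.1 (l - iv.1)) answer) =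
    (PySem.List.enumerate em 0).map (fun iv =>
      1 + (em.countP (fun w => decide (iv.2 < w)) : Int)
        + ((PySem.List.enumerate em 0).countP
             (fun jw => decide (iv.1 < jw.1) && decide (jw.2 = iv.2)) : Int)) := by
  simp only []
  set L := PySem.List.enumerate em 0 with hL
  set S := PySem.List.sorted L (fun p => p.2) false with hS
  have hperm : S.Perm L := PySem.List.sorted_perm L _ _
  have hlex : S.Pairwise lexP := by
    rw [hS, hL]
    rw [PySem.List.sorted_eq_foldl_insertBy]
    exact foldl_insertBy_lex _ [] (by simp) (by simp) (PySem.List.pairwise_lt_enumerate em 0)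
  have hLfst : L.map (fun p => p.1) = PySem.List.pyRange 0 (em.length : Int) := by
    rw [hL, PySem.List.map_fst_enumerate]; norm_num
  have hSnodup : (S.map (fun p => p.1)).Nodup := by
    refine ((hperm.map (fun p => p.1)).nodup_iff).mpr ?_
    rw [hLfst]; exact PySem.List.nodup_pyRange_one _ _
  have hrange : ∀ p ∈ S, 0 ≤ p.1 ∧ p.1 < ((List.replicate em.length (0:Int)).length : Int) := by
    intro p hp
    rcases (PySem.List.mem_enumerate_iff em 0 p).mp (hperm.mem_iff.mp hp) with ⟨k', hk', rfl⟩
    simp; omega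
  have hlenL : L.length = em.length := by rw [hL]; exact PySem.List.length_enumerate em 0
  have hlenS : S.length = em.length := by rw [hperm.length_eq, hlenL]
  apply List.ext_getElem
  · rw [foldl_set_length]; simp [hlenL]
  · intro k hk1 hk2
    have hk1' : k < em.length := by
      rw [foldl_set_length] at hk1
      simpa using hk1
    -- the B side
    have hkL : k < L.length := by omega
    have hLk : L[k]'hkL = (0 + (k : Int), em[k]'hk1') :=
      PySem.List.getElem_enumerate em 0 k hkL
    rw [List.getElem_map, hLk]
    simp only [zero_add]
    set v := em[k]'hk1' with hv
    -- the A side via the fold characterization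
    have hkmem : (k : Int) ∈ S.map (fun p => p.1) := by
      rw [(hperm.map _).mem_iff, hLfst, PySem.List.mem_pyRange_one]
      constructor <;> omega
    obtain ⟨j, hj⟩ := Option.isSome_iff_exists.mp ((PySem.List.index?_isSome_iff _ _).mpr hkmem)
    have hA : (List.foldl (fun ans iv => pySetItem ans iv.2.1 ((em.length : Int) - iv.1))
        (List.replicate em.length (0:Int)) (PySem.List.enumerate S 0)).getD k 0 =
        (em.length : Int) - (0 + (j : Int)) := by
      rw [foldl_set_getD (em.length : Int) S 0 _ hrange hSnodup k (by simp; omega), hj]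
    rw [← List.getD_eq_getElem _ (0:Int) hk1, hA]
    -- identify S[j]
    obtain ⟨hjlen, hSj_fst, _⟩ := PySem.List.getElem_of_index?_eq_some hj
    rw [List.getElem_map] at hSj_fst
    have hjS : j < S.length := by simpa using hjlen
    have hSjmem : S[j]'hjS ∈ L := hperm.mem_iff.mp (List.getElem_mem hjS)
    obtain ⟨k', hk', hSj⟩ := (PySem.List.mem_enumerate_iff em 0 _).mp hSjmem
    have hkk' : k' = k := by
      have := hSj ▸ hSj_fst
      simp at this; omega
    have hSjval : S[j]'hjS = ((k : Int), v) := by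
      rw [hSj]
      have hge : em[k']'hk' = v := by subst hkk'; rw [hv]
      rw [hge]
      simp [hkk']
    -- position = count of lexP-smaller elements
    have hcount := pos_eq_countP S hlex j hjS
    rw [hSjval] at hcount
    rw [hperm.countP_eq] at hcount
    -- counting partition over L
    set cl := L.countP (fun y => lexb y ((k:Int), v)) with hcl
    set ce := L.countP (fun y => decide (v < y.2)) with hce
    set cc := L.countP (fun y => decide (y.2 = v) && decide (y.1 = (k:Int))) with hcc
    set cd := L.countP (fun y => decide ((k:Int) < y.1) && decide (y.2 = v)) with hcd
    have F1 : cl + (ce + (cc + cd)) = L.length := by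
      have h1 : L.length = cl + L.countP (fun y => !(lexb y ((k:Int), v))) := by
        rw [hcl]
        rw [List.length_eq_countP_add_countP (fun y => lexb y ((k:Int), v))]
        congr 1
        apply List.countP_congr; intro x _; simp
      have h2 : L.countP (fun y => !(lexb y ((k:Int), v))) =
          L.countP (fun y => decide (v < y.2) || (decide (y.2 = v) && decide ((k:Int) ≤ y.1))) := by
        apply List.countP_congr; intro x _
        simp [lexb]; omega
      have h3 : L.countP (fun y => decide (v < y.2) || (decide (y.2 = v) && decide ((k:Int) ≤ y.1))) =
          ce + L.countP (fun y => decide (y.2 = v) && decide ((k:Int) ≤ y.1)) := by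
        rw [hce]
        apply countP_or_disjoint
        intro x _ ⟨hx1, hx2⟩
        simp at hx1 hx2; omega
      have h4 : L.countP (fun y => decide (y.2 = v) && decide ((k:Int) ≤ y.1)) =
          L.countP (fun y => (decide (y.2 = v) && decide (y.1 = (k:Int))) ||
                             (decide ((k:Int) < y.1) && decide (y.2 = v))) := by
        apply List.countP_congr; intro x _
        simp; omega
      have h5 : L.countP (fun y => (decide (y.2 = v) && decide (y.1 = (k:Int))) ||
                             (decide ((k:Int) < y.1) && decide (y.2 = v))) = cc + cd := by
        rw [hcc, hcd]
        apply countP_or_disjoint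
        intro x _ ⟨hx1, hx2⟩
        simp at hx1 hx2; omega
      omega
    have F3 : cc = 1 := by
      have hcnt : cc = L.count ((k:Int), v) := by
        rw [hcc, List.count]
        apply List.countP_congr; intro x _
        simp [Prod.ext_iff]; tauto
      rw [hcnt]
      apply List.count_eq_one_of_mem
      · have : L.Pairwise (fun a b => a ≠ b) := by
          apply (PySem.List.pairwise_lt_enumerate em 0).imp
          intro a b hab heq; rw [heq] at hab; omega
        exact this
      · rw [hL, PySem.List.mem_enumerate_iff]
        exact ⟨k, by omega, by rw [hv]; norm_num⟩
    have F4 : em.countP (fun w => decide (v < w)) = ce := by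
      rw [hce, hL]
      conv_lhs => rw [← PySem.List.map_snd_enumerate em 0]
      rw [List.countP_map]
      rfl
    rw [F4]
    have hll : L.length = em.length := hlenL
    omega

-- ===== VERDICT (by name: the statement is the Claim_ definition above) =====
theorem solution_spec : Claim_equal_solution := by
  intro em _
  unfold Spec_solution solution solution_alt
  exact main_check em
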